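-- pv_equiv track=rewrite | github.com/letram200197/LNA-TGT | Combination code.py | generate_lna_combinations_exclude_terminals
-- ===== SOURCE A (Python) =====
-- from itertools import combinations
--
-- def generate_lna_combinations_exclude_terminals(sequence, num_lnas):
--     """
--     Generate DNA sequences with LNA modifications at specific positions, excluding terminals.
--
--     Parameters:
--     sequence (str): The original DNA sequence.
--     num_lnas (int): The number of LNA modifications to add.
--
--     Returns:
--     list: A list of sequences with LNA modifications.
--     """
--     # Exclude the first and last positions (terminal positions)
--     positions = list(range(1, len(sequence) - 1))  # Exclude terminal positions
--     comb = combinations(positions, num_lnas)  # Generate combinations of positions for LNA insertion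
--
--     lna_sequences = []
--     for c in comb:
--         # Create a mutable copy of the sequence
--         new_seq = list(sequence)
--         # Add "+" to the positions selected for LNA
--         for pos in c:
--             new_seq[pos] = "+" + new_seq[pos]
--         # Convert the list back to a string and store it
--         lna_sequences.append("".join(new_seq))
--
--     return lna_sequences
-- ===== SOURCE B (Python) =====
-- def generate_lna_combinations_exclude_terminals(sequence, num_lnas):
--     """Depth-first walk over the non-terminal positions: at each position either
--     place a '+' mark (include branch first, matching lexicographic order) or skip
--     it, pruning when too few positions remain; strings are emitted incrementally."""
--     if num_lnas < 0:
--         return []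
--     n = len(sequence)
--     results = []
--
--     def walk(i, remaining, prefix):
--         if remaining == 0:
--             results.append(prefix + sequence[i:])
--         elif remaining <= (n - 1) - i:
--             walk(i + 1, remaining - 1, prefix + "+" + sequence[i])
--             walk(i + 1, remaining, prefix + sequence[i])
--
--     walk(1, num_lnas, sequence[:1])
--     return results
-- ===== Notes on version B (the rewrite author's own statement) =====
-- stated objective: alternative
-- what changed: Replaces materialising itertools.combinations tuples and rebuilding list(sequence) for each tuple by a recursive depth-first walk over the non-terminal positions (include-'+' branch before skip, pruned when too few positions remain) that emits each string incrementally.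
import Mathlib
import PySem

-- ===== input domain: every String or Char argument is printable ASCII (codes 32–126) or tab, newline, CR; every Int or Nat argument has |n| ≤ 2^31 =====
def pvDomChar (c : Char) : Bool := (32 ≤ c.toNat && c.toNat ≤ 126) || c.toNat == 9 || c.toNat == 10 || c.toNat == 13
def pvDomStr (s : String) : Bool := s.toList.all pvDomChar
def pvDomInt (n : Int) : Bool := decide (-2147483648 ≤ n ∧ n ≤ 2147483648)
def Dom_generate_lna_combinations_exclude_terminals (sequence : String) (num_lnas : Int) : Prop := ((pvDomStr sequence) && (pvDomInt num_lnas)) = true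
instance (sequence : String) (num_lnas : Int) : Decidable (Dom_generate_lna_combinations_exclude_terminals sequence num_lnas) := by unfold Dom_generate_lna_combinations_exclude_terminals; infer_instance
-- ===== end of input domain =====

-- B replaces A's materialised itertools.combinations + per-combination rebuild of list(sequence)
-- by a depth-first recursive walk over the non-terminal positions (include-'+' branch first,
-- then skip), emitting each string incrementally; an alternative decomposition, not claimed faster.

-- ===== PORT A =====
-- Python list(sequence) is a list of one-character strings; it is modelled as List (List Char)
-- (each cell one or two code points after marking), joined back with PySem.Chars.join and String.mk.
def generate_lna_combinations_exclude_terminals (sequence : String) (num_lnas : Int) : List String :=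
  let positions := PySem.List.pyRange 1 (PySem.Str.len sequence - 1) 1
  -- Pre_ gives 0 ≤ num_lnas (itertools.combinations raises ValueError on a negative r), so .toNat is exact
  let comb := PySem.List.combinations positions num_lnas.toNat
  comb.foldl (fun lna_sequences c =>
    let new_seq : List (List Char) := sequence.toList.map (fun ch => [ch])
    let marked := c.foldl (fun seq pos =>
      PySem.List.pySetD seq pos ('+' :: PySem.List.pyGetD seq pos [])) new_seq
    lna_sequences ++ [String.mk (PySem.Chars.join [] marked)]) []

-- ===== PORT B =====
-- the inner recursive walk of Source B; prefixes are carried as List Char and packed by String.mk at the top level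
def pvWalk (cs : List Char) (n i r : Nat) (pre : List Char) : List (List Char) :=
  if r = 0 then [pre ++ cs.drop i]
  else if (r : Int) ≤ (n : Int) - 1 - (i : Int) then
    -- the guard puts i ≤ n - 2 < cs.length, so sequence[i] is in range and getD is exact
    pvWalk cs n (i+1) (r-1) (pre ++ ['+', cs.getD i ' ']) ++
    pvWalk cs n (i+1) r (pre ++ [cs.getD i ' '])
  else []
  termination_by n - i
  decreasing_by all_goals omega

def generate_lna_combinations_exclude_terminals_alt (sequence : String) (num_lnas : Int) : List String :=
  if num_lnas < 0 then []
  else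
    let cs := sequence.toList
    (pvWalk cs cs.length 1 num_lnas.toNat (cs.take 1)).map String.mk

-- ===== PRECONDITION & SPEC =====
-- Pre_ excludes num_lnas < 0, where A raises ValueError (itertools.combinations with negative r);
-- B returns [] there.
def Pre_generate_lna_combinations_exclude_terminals (sequence : String) (num_lnas : Int) : Prop :=
  0 ≤ num_lnas
instance (sequence : String) (num_lnas : Int) : Decidable (Pre_generate_lna_combinations_exclude_terminals sequence num_lnas) := by unfold Pre_generate_lna_combinations_exclude_terminals; infer_instance
def pvWitness_generate_lna_combinations_exclude_terminals : String × Int := ("ACGT", 2)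

def Spec_generate_lna_combinations_exclude_terminals (sequence : String) (num_lnas : Int) (out : List String) : Prop := out = generate_lna_combinations_exclude_terminals_alt sequence num_lnas
instance (sequence : String) (num_lnas : Int) (out : List String) : Decidable (Spec_generate_lna_combinations_exclude_terminals sequence num_lnas out) := by unfold Spec_generate_lna_combinations_exclude_terminals; infer_instance

-- ===== CLAIM (what is proved, stated in full; the proofs are below) =====
def Claim_equal_generate_lna_combinations_exclude_terminals : Prop := ∀ (sequence : String) (num_lnas : Int), Dom_generate_lna_combinations_exclude_terminals sequence num_lnas → Pre_generate_lna_combinations_exclude_terminals sequence num_lnas → Spec_generate_lna_combinations_exclude_terminals sequence num_lnas (generate_lna_combinations_exclude_terminals sequence num_lnas)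

-- ===== LEMMAS AND PROOFS =====

-- reference marker: the suffix of cs from index i with '+' prepended before each index listed in c
def pvMarkFrom (cs : List Char) : Nat → List Int → List Char
  | i, [] => cs.drop i
  | i, p :: ps =>
    if _h : cs.length ≤ i then cs.drop i
    else if (i : Int) = p then '+' :: cs.getD i ' ' :: pvMarkFrom cs (i+1) ps
    else cs.getD i ' ' :: pvMarkFrom cs (i+1) (p :: ps)
  termination_by i _ => cs.length - i
  decreasing_by all_goals omega

-- cell j of the marked sequence
def pvG (cs : List Char) (c : List Int) (j : Nat) : List Char :=
  if (j : Int) ∈ c then ['+', cs.getD j ' '] else [cs.getD j ' ']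

lemma pvJoin_nil_flatten (L : List (List Char)) : PySem.Chars.join [] L = L.flatten := by
  induction L with
  | nil => simpa using PySem.Chars.join_nil ([] : List Char)
  | cons a t ih =>
    cases t with
    | nil => simpa using PySem.Chars.join_singleton ([] : List Char) a
    | cons b u =>
      rw [PySem.Chars.join_cons_cons] at *
      simp_all

lemma pvMarkLoop_length (c : List Int) (seq : List (List Char)) (h : ∀ p ∈ c, 0 ≤ p) :
    (c.foldl (fun seq pos =>
      PySem.List.pySetD seq pos ('+' :: PySem.List.pyGetD seq pos [])) seq).length = seq.length := by
  induction c generalizing seq with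
  | nil => rfl
  | cons p ps ih =>
    simp only [List.foldl_cons]
    rw [ih _ (fun q hq => h q (List.mem_cons_of_mem _ hq))]
    simp [PySem.List.length_pySetD]

lemma pvMarkLoop_getD (c : List Int) (seq : List (List Char)) (j : Nat)
    (hnd : c.Nodup) (hr : ∀ p ∈ c, 0 ≤ p ∧ p.toNat < seq.length) (hj : j < seq.length) :
    (c.foldl (fun seq pos =>
      PySem.List.pySetD seq pos ('+' :: PySem.List.pyGetD seq pos [])) seq).getD j []
    = if (j : Int) ∈ c then '+' :: seq.getD j [] else seq.getD j [] := by
  induction c generalizing seq with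
  | nil => simp
  | cons p ps ih =>
    obtain ⟨hp0, hpl⟩ := hr p (List.mem_cons_self ..)
    have hset : PySem.List.pySetD seq p ('+' :: PySem.List.pyGetD seq p []) =
        seq.set p.toNat ('+' :: seq.getD p.toNat []) := by
      rw [PySem.List.pySetD_of_nonneg _ _ hp0, PySem.List.pyGetD_of_nonneg _ _ hp0]
    simp only [List.foldl_cons, hset]
    rw [ih (seq.set p.toNat ('+' :: seq.getD p.toNat []))
        (List.Nodup.of_cons hnd)
        (fun q hq => by simpa using hr q (List.mem_cons_of_mem _ hq))
        (by simpa using hj)]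
    have hji : ((j : Int) = p) ↔ j = p.toNat := by omega
    by_cases hjp : j = p.toNat
    · have hpnot : (j : Int) ∉ ps := by
        rw [hji.mpr hjp] at *
        exact (List.nodup_cons.mp hnd).1
      have hmem : ((j : Int) ∈ p :: ps) := by
        rw [hji.mpr hjp]; exact List.mem_cons_self ..
      have hgetset : (seq.set p.toNat ('+' :: seq.getD p.toNat [])).getD j []
          = '+' :: seq.getD j [] := by
        subst hjp
        rw [List.getD_eq_getElem?_getD, List.getElem?_set_self hj,
          List.getD_eq_getElem?_getD]
        rfl
      rw [if_neg hpnot, if_pos hmem, hgetset]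
    · have hne : ¬ ((j : Int) = p) := fun h => hjp (hji.mp h)
      have hmem : ((j : Int) ∈ p :: ps) ↔ ((j : Int) ∈ ps) := by
        simp [List.mem_cons, hne]
      have hgetset : (seq.set p.toNat ('+' :: seq.getD p.toNat [])).getD j []
          = seq.getD j [] := by
        simp only [List.getD_eq_getElem?_getD, List.getElem?_set_ne (Ne.symm hjp)]
      rw [hgetset]
      simp only [List.mem_cons, hne, false_or]

lemma pvMarkLoop_eq_map (cs : List Char) (c : List Int)
    (hnd : c.Nodup) (hr : ∀ p ∈ c, 0 ≤ p ∧ p.toNat < cs.length) :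
    (c.foldl (fun seq pos =>
      PySem.List.pySetD seq pos ('+' :: PySem.List.pyGetD seq pos []))
      (cs.map (fun ch => [ch])))
    = (List.range cs.length).map (pvG cs c) := by
  apply List.ext_getElem
  · rw [pvMarkLoop_length _ _ (fun p hp => (hr p hp).1)]; simp
  · intro j h1 h2
    have hj : j < cs.length := by
      rw [pvMarkLoop_length _ _ (fun p hp => (hr p hp).1)] at h1; simpa using h1
    have hbase : (cs.map (fun ch => [ch])).getD j [] = [cs.getD j ' '] := by
      simp [List.getD_eq_getElem?_getD, hj]
    rw [← List.getD_eq_getElem _ [] h1, ← List.getD_eq_getElem _ [] h2]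
    rw [pvMarkLoop_getD c _ j hnd (by simpa using hr) (by simpa using hj)]
    have : ((List.range cs.length).map (pvG cs c)).getD j [] = pvG cs c j := by
      simp [List.getD_eq_getElem?_getD, hj]
    rw [this, hbase, pvG]

lemma pvMarkFrom_nil (cs : List Char) (i : Nat) : pvMarkFrom cs i [] = cs.drop i := by
  simp [pvMarkFrom]

lemma pvMarkFrom_cons_self (cs : List Char) (i : Nat) (ps : List Int) (h : i < cs.length) :
    pvMarkFrom cs i ((i : Int) :: ps) = '+' :: cs.getD i ' ' :: pvMarkFrom cs (i+1) ps := by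
  rw [pvMarkFrom]
  simp [Nat.not_le.mpr h]

lemma pvMarkFrom_skip (cs : List Char) (i : Nat) (c : List Int)
    (h : i < cs.length) (hall : ∀ p ∈ c, (i : Int) < p) :
    pvMarkFrom cs i c = cs.getD i ' ' :: pvMarkFrom cs (i+1) c := by
  cases c with
  | nil =>
    rw [pvMarkFrom_nil, pvMarkFrom_nil, List.drop_eq_getElem_cons h,
      List.getD_eq_getElem _ _ h]
  | cons p ps =>
    have hne : ¬ ((i : Int) = p) := by
      have := hall p (List.mem_cons_self ..); omega
    rw [pvMarkFrom]
    simp [Nat.not_le.mpr h, hne]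

lemma pvMarkFrom_flat (cs : List Char) : ∀ (d i : Nat) (c : List Int),
    cs.length - i = d → c.Pairwise (· < ·) →
    (∀ p ∈ c, (i : Int) ≤ p ∧ p < (cs.length : Int)) →
    pvMarkFrom cs i c = (List.range' i (cs.length - i)).flatMap (pvG cs c) := by
  intro d
  induction d with
  | zero =>
    intro i c hd hpw hr
    have hi : cs.length ≤ i := by omega
    have hc : c = [] := by
      cases c with
      | nil => rfl
      | cons p ps =>
        have := hr p (List.mem_cons_self ..); omega
    subst hc
    simp [pvMarkFrom_nil, hd, List.drop_eq_nil_of_le hi]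
  | succ d ih =>
    intro i c hd hpw hr
    have hi : i < cs.length := by omega
    have hrange : List.range' i (cs.length - i) = i :: List.range' (i+1) (cs.length - (i+1)) := by
      have : cs.length - i = (cs.length - (i+1)) + 1 := by omega
      rw [this, List.range'_succ]
    rw [hrange]
    cases c with
    | nil =>
      rw [pvMarkFrom_skip cs i [] hi (by simp)]
      rw [ih (i+1) [] (by omega) (by simp) (by simp)]
      simp [List.flatMap_cons, pvG]
    | cons p ps =>
      by_cases hpi : (i : Int) = p
      · subst hpi
        rw [pvMarkFrom_cons_self cs i ps hi]
        have hps : ∀ q ∈ ps, (i : Int) < q := by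
          intro q hq; exact (List.pairwise_cons.mp hpw).1 q hq
        rw [ih (i+1) ps (by omega)
          (List.Pairwise.of_cons hpw)
          (fun q hq => ⟨by have := hps q hq; omega, (hr q (List.mem_cons_of_mem _ hq)).2⟩)]
        rw [List.flatMap_cons]
        have hgi : pvG cs ((i:Int) :: ps) i = ['+', cs.getD i ' '] := by
          simp [pvG]
        rw [hgi]
        have hcong : (List.range' (i+1) (cs.length - (i+1))).flatMap (pvG cs ps)
            = (List.range' (i+1) (cs.length - (i+1))).flatMap (pvG cs ((i:Int) :: ps)) := by
          apply List.flatMap_congr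
          intro j hj
          have hij : i + 1 ≤ j := by
            obtain ⟨t, _, rfl⟩ := List.mem_range'.mp hj; omega
          have : ((j : Int) ∈ (i:Int) :: ps) ↔ ((j : Int) ∈ ps) := by
            simp only [List.mem_cons]
            constructor
            · rintro (h | h); · omega
              exact h
            · exact Or.inr
          simp only [pvG, this]
        rw [← hcong]
        rfl
      · have hall : ∀ q ∈ p :: ps, (i : Int) < q := by
          intro q hq
          rcases List.mem_cons.mp hq with h | h
          · subst h; have := (hr q (by simp)).1; omega
          · have hpq : p < q := (List.pairwise_cons.mp hpw).1 q h
            have := (hr p (List.mem_cons_self ..)).1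
            omega
        rw [pvMarkFrom_skip cs i (p :: ps) hi hall]
        rw [ih (i+1) (p :: ps) (by omega) hpw
          (fun q hq => ⟨by have := hall q hq; omega, (hr q hq).2⟩)]
        rw [List.flatMap_cons]
        have hgi : pvG cs (p :: ps) i = [cs.getD i ' '] := by
          have : (i : Int) ∉ p :: ps := fun h => by have := hall _ h; omega
          simp [pvG, this]
        rw [hgi]
        rfl

-- B's walk enumerates exactly the combinations of the remaining positions, in itertools order
lemma pvWalk_eq (cs : List Char) : ∀ (i r : Nat) (pre : List Char),
    pvWalk cs cs.length i r pre =
      (PySem.List.combinations (PySem.List.pyRange (i : Int) ((cs.length : Int) - 1) 1) r).map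
        (fun c => pre ++ pvMarkFrom cs i c) := by
  intro i r pre
  induction i, r, pre using pvWalk.induct cs cs.length with
  | case1 i pre =>
    rw [pvWalk]
    simp [PySem.List.combinations_zero, pvMarkFrom_nil]
  | case2 i r pre h0 h ih1 ih2 =>
    have hi : (i : Int) < (cs.length : Int) - 1 := by omega
    have hilen : i < cs.length := by omega
    rw [pvWalk, if_neg h0, if_pos h]
    rw [PySem.List.pyRange_one_cons hi]
    obtain ⟨r', rfl⟩ : ∃ r', r = r' + 1 := ⟨r - 1, by omega⟩
    rw [PySem.List.combinations_cons_succ, List.map_append, List.map_map]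
    have hr' : r' + 1 - 1 = r' := by omega
    simp only [hr', Nat.cast_add, Nat.cast_one] at ih1 ih2 ⊢
    rw [ih1, ih2]
    congr 1
    · apply List.map_congr_left
      intro c _
      show (pre ++ ['+', cs.getD i ' ']) ++ pvMarkFrom cs (i+1) c
          = pre ++ pvMarkFrom cs i ((i : Int) :: c)
      rw [pvMarkFrom_cons_self cs i c hilen]
      simp
    · apply List.map_congr_left
      intro c hc
      have hsub := PySem.List.sublist_of_mem_combinations hc
      have hall : ∀ p ∈ c, (i : Int) < p := by
        intro p hp
        have := PySem.List.mem_pyRange_one.mp (hsub.subset hp)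
        omega
      show (pre ++ [cs.getD i ' ']) ++ pvMarkFrom cs (i+1) c = pre ++ pvMarkFrom cs i c
      rw [pvMarkFrom_skip cs i c hilen hall]
      simp
  | case3 i r pre h0 h =>
    rw [pvWalk, if_neg h0, if_neg h]
    have hlen : (PySem.List.pyRange (i : Int) ((cs.length : Int) - 1) 1).length < r := by
      rw [PySem.List.length_pyRange_one]; omega
    rw [PySem.List.combinations_eq_nil_of_length_lt _ hlen]
    rfl

-- per-combination agreement of the two string builders
lemma pvPerComb (cs : List Char) (c : List Int)
    (hpw : c.Pairwise (· < ·))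
    (hr : ∀ p ∈ c, 1 ≤ p ∧ p < (cs.length : Int) - 1) :
    PySem.Chars.join [] (c.foldl (fun seq pos =>
      PySem.List.pySetD seq pos ('+' :: PySem.List.pyGetD seq pos []))
      (cs.map (fun ch => [ch])))
    = cs.take 1 ++ pvMarkFrom cs 1 c := by
  have hnd : c.Nodup := hpw.imp (fun h => ne_of_lt h)
  by_cases hn : cs.length = 0
  · have hc : c = [] := by
      cases c with
      | nil => rfl
      | cons p ps =>
        have := hr p (List.mem_cons_self ..)
        omega
    have hcs : cs = [] := List.length_eq_zero_iff.mp hn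
    subst hc; subst hcs
    simpa [pvMarkFrom_nil] using PySem.Chars.join_nil ([] : List Char)
  · have hpos : 0 < cs.length := by omega
    rw [pvMarkLoop_eq_map cs c hnd
      (fun p hp => ⟨by have := hr p hp; omega, by have := hr p hp; omega⟩)]
    rw [pvJoin_nil_flatten]
    have hflat : ((List.range cs.length).map (pvG cs c)).flatten
        = (List.range cs.length).flatMap (pvG cs c) := rfl
    rw [hflat]
    have h0 := pvMarkFrom_flat cs (cs.length - 0) 0 c rfl hpw
      (fun p hp => ⟨by have := hr p hp; omega, by have := hr p hp; omega⟩)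
    rw [List.range_eq_range']
    have hsub0 : cs.length - 0 = cs.length := rfl
    rw [← hsub0, ← h0]
    rw [pvMarkFrom_skip cs 0 c hpos (fun p hp => by have := (hr p hp).1; omega)]
    cases cs with
    | nil => simp at hpos
    | cons ch t => rfl

-- ===== VERDICT (by name: the statement is the Claim_ definition above) =====
theorem generate_lna_combinations_exclude_terminals_spec : Claim_equal_generate_lna_combinations_exclude_terminals := by
  intro s k _ hPre
  unfold Pre_generate_lna_combinations_exclude_terminals at hPre
  unfold Spec_generate_lna_combinations_exclude_terminals
  unfold generate_lna_combinations_exclude_terminals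
  unfold generate_lna_combinations_exclude_terminals_alt
  rw [if_neg (not_lt.mpr hPre)]
  simp only [PySem.Str.len_eq]
  rw [PySem.List.foldl_append_singleton_eq_map, List.nil_append]
  have hone : ((1 : Nat) : Int) = (1 : Int) := rfl
  rw [pvWalk_eq s.toList 1 k.toNat (s.toList.take 1), hone, List.map_map]
  apply List.map_congr_left
  intro c hc
  have hsub := PySem.List.sublist_of_mem_combinations hc
  have hpw : c.Pairwise (· < ·) :=
    List.Pairwise.sublist hsub (PySem.List.pairwise_lt_pyRange_one _ _)
  have hrange : ∀ p ∈ c, 1 ≤ p ∧ p < (s.toList.length : Int) - 1 := by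
    intro p hp
    exact PySem.List.mem_pyRange_one.mp (hsub.subset hp)
  exact congrArg String.mk (pvPerComb s.toList c hpw hrange)
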